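-- pv_equiv track=rewrite | github.com/Alskuu/quarto_game | heuristics.py | is_quarto_line
-- ===== SOURCE A (Python) =====
-- def is_quarto_line(vals):
--     """
--     Vérifie si une ligne est gagnante :
--     - aucune case vide
--     - au moins un attribut (bit parmi 4) est commun à toutes les pièces de la ligne.
--     """
--     if any(v == -1 for v in vals):
--         return False
--     for k in range(4):
--         b0 = (vals[0] >> k) & 1
--         if all(((v >> k) & 1) == b0 for v in vals):
--             return True
--     return False
-- ===== SOURCE B (Python) =====
-- def is_quarto_line(vals):
--     if any(v == -1 for v in vals):
--         return False
--     ones = 15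
--     zeros = 15
--     for v in vals:
--         w = v % 16
--         ones &= w
--         zeros &= ~w & 15
--     return ones != 0 or zeros != 0
-- ===== Notes on version B (the rewrite author's own statement) =====
-- stated objective: alternative
-- what changed: Replaces A's per-bit loop (4 passes over the pieces, each re-reading the first piece and comparing every piece's bit to it) by a single pass that folds every piece into two 4-bit masks (attributes set in all pieces / clear in all pieces) and tests the masks for non-emptiness.
import Mathlib
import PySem

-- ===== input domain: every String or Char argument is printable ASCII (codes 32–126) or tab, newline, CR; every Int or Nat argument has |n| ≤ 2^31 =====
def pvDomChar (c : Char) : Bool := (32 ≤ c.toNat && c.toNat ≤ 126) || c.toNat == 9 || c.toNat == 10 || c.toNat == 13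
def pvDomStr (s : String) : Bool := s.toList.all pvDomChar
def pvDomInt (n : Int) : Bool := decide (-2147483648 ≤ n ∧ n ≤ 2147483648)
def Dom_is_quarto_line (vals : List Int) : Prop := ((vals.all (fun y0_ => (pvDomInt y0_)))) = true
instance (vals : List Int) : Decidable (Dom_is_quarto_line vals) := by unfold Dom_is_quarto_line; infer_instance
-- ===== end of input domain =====

-- B replaces A's four per-bit passes by one fold into two 4-bit masks (same guard, same result);
-- Pre_ excludes only the empty list, on which Python A raises IndexError when indexing the first element.

-- ===== PORT A =====
def is_quarto_line (vals : List Int) : Bool :=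
  if vals.any (fun v => v == -1) then false
  else
    (PySem.List.pyRange 0 4 1).any (fun k =>
      match PySem.List.pyGet? vals 0 with
      | none => false        -- Python raises IndexError here (empty vals); excluded by Pre_
      | some v0 =>
        let b0 := PySem.Int.band (v0 >>> k.toNat) 1
        vals.all (fun v => PySem.Int.band (v >>> k.toNat) 1 == b0))

-- ===== PORT B =====
def is_quarto_line_alt (vals : List Int) : Bool :=
  if vals.any (fun v => v == -1) then false
  else
    let p := vals.foldl
      (fun (p : Int × Int) v =>
        let w := PySem.Int.mod v 16
        (PySem.Int.band p.1 w, PySem.Int.band p.2 (PySem.Int.band (Int.not w) 15)))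
      (15, 15)
    (p.1 != 0) || (p.2 != 0)

-- ===== PRECONDITION & SPEC =====
-- Python A indexes the first element, which raises IndexError on the empty list; that is the only exception.
def Pre_is_quarto_line (vals : List Int) : Prop := vals ≠ []
instance (vals : List Int) : Decidable (Pre_is_quarto_line vals) := by unfold Pre_is_quarto_line; infer_instance
def pvWitness_is_quarto_line : List Int := ([5, 7])

def Spec_is_quarto_line (vals : List Int) (out : Bool) : Prop := out = is_quarto_line_alt vals
instance (vals : List Int) (out : Bool) : Decidable (Spec_is_quarto_line vals out) := by unfold Spec_is_quarto_line; infer_instance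

-- ===== CLAIM (what is proved, stated in full; the proofs are below) =====
def Claim_equal_is_quarto_line : Prop := ∀ (vals : List Int), Dom_is_quarto_line vals → Pre_is_quarto_line vals → Spec_is_quarto_line vals (is_quarto_line vals)

-- ===== LEMMAS AND PROOFS =====

-- pvBit x k is Python's (x >> k) & 1 written as floor-division arithmetic
def pvBit (x : Int) (k : Nat) : Int := x / 2^k % 2

lemma pvBit_mod16 (v : Int) (k : Nat) (hk : k < 4) : pvBit (v % 16) k = pvBit v k := by
  interval_cases k <;> simp [pvBit] <;> omega

lemma pvInt_not_eq (a : Int) : Int.not a = -a - 1 := by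
  cases a <;> simp [Int.not, Int.negSucc_eq] <;> omega

lemma pvNatMask : ∀ u < 16, (15 &&& u) = u := by decide

lemma pvNatAnd : ∀ a < 16, ∀ b < 16, (a &&& b) < 16 ∧
    (∀ k < 4, ((a &&& b) / 2^k % 2 = 1 ↔ (a / 2^k % 2 = 1 ∧ b / 2^k % 2 = 1))) := by decide

lemma pvBand_small (a b : Int) (ha : 0 ≤ a) (ha16 : a < 16) (hb : 0 ≤ b) (hb16 : b < 16) :
    0 ≤ PySem.Int.band a b ∧ PySem.Int.band a b < 16 ∧
    ∀ k < 4, (pvBit (PySem.Int.band a b) k = 1 ↔ (pvBit a k = 1 ∧ pvBit b k = 1)) := by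
  rw [PySem.Int.band_of_nonneg ha hb]
  have h := pvNatAnd a.toNat (by omega) b.toNat (by omega)
  refine ⟨by positivity, by exact_mod_cast h.1, ?_⟩
  intro k hk
  have h2 := h.2 k hk
  have h2a : ((a.toNat &&& b.toNat : Nat) : Int) / 2^k % 2 = 1 ↔
      ((a.toNat : Int) / 2^k % 2 = 1 ∧ (b.toNat : Int) / 2^k % 2 = 1) := by
    exact_mod_cast h2
  simpa [pvBit, Int.toNat_of_nonneg ha, Int.toNat_of_nonneg hb] using h2a

lemma pvNotMask (w : Int) (h0 : 0 ≤ w) (h16 : w < 16) :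
    PySem.Int.band (Int.not w) 15 = 15 - w := by
  have hn : Int.not w = -w - 1 := pvInt_not_eq w
  have hneg : ¬ (0 ≤ Int.not w) := by omega
  unfold PySem.Int.band
  rw [if_neg hneg, if_pos (by norm_num : (0:Int) ≤ 15)]
  have : (-(Int.not w) - 1) = w := by omega
  rw [this]
  have : ((15:Int).toNat &&& w.toNat) = w.toNat := pvNatMask w.toNat (by omega)
  rw [this]
  omega

def pvStep (p : Int × Int) (v : Int) : Int × Int :=
  let w := PySem.Int.mod v 16
  (PySem.Int.band p.1 w, PySem.Int.band p.2 (PySem.Int.band (Int.not w) 15))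

lemma pvBit01 (x : Int) (k : Nat) : pvBit x k = 0 ∨ pvBit x k = 1 := by
  unfold pvBit; omega

lemma pvFoldB (t : List Int) (z1 z2 : Int)
    (h1 : 0 ≤ z1 ∧ z1 < 16) (h2 : 0 ≤ z2 ∧ z2 < 16) :
    (0 ≤ (t.foldl pvStep (z1, z2)).1 ∧ (t.foldl pvStep (z1, z2)).1 < 16) ∧
    (0 ≤ (t.foldl pvStep (z1, z2)).2 ∧ (t.foldl pvStep (z1, z2)).2 < 16) ∧
    ∀ k < 4,
      (pvBit (t.foldl pvStep (z1, z2)).1 k = 1 ↔ (pvBit z1 k = 1 ∧ ∀ v ∈ t, pvBit v k = 1)) ∧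
      (pvBit (t.foldl pvStep (z1, z2)).2 k = 1 ↔ (pvBit z2 k = 1 ∧ ∀ v ∈ t, pvBit v k = 0)) := by
  induction t generalizing z1 z2 with
  | nil => simp; exact ⟨h1, h2⟩
  | cons v t ih =>
    simp only [List.foldl_cons]
    have hw0 : 0 ≤ v % 16 := by omega
    have hw16 : v % 16 < 16 := by omega
    have hstep : pvStep (z1, z2) v =
        (PySem.Int.band z1 (v % 16), PySem.Int.band z2 (15 - v % 16)) := by
      simp [pvStep, pvNotMask (v % 16) hw0 hw16]
    rw [hstep]
    have hb1 := pvBand_small z1 (v % 16) h1.1 h1.2 hw0 hw16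
    have hb2 := pvBand_small z2 (15 - v % 16) h2.1 h2.2 (by omega) (by omega)
    have := ih _ _ ⟨hb1.1, hb1.2.1⟩ ⟨hb2.1, hb2.2.1⟩
    refine ⟨this.1, this.2.1, ?_⟩
    intro k hk
    have t1 := (this.2.2 k hk).1
    have t2 := (this.2.2 k hk).2
    have s1 := hb1.2.2 k hk
    have s2 := hb2.2.2 k hk
    have hm := pvBit_mod16 v k hk
    have hsub : pvBit (15 - v % 16) k = 1 ↔ pvBit v k = 0 := by
      interval_cases k <;> simp [pvBit] at * <;> omega
    constructor
    · rw [t1, s1, hm]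
      simp only [List.mem_cons]
      constructor
      · rintro ⟨⟨hz, hv⟩, hall⟩
        exact ⟨hz, fun x hx => hx.elim (fun h => h ▸ hv) (hall x)⟩
      · rintro ⟨hz, hall⟩
        exact ⟨⟨hz, hall v (Or.inl rfl)⟩, fun x hx => hall x (Or.inr hx)⟩
    · rw [t2, s2, hsub]
      simp only [List.mem_cons]
      constructor
      · rintro ⟨⟨hz, hv⟩, hall⟩
        exact ⟨hz, fun x hx => hx.elim (fun h => h ▸ hv) (hall x)⟩
      · rintro ⟨hz, hall⟩
        exact ⟨⟨hz, hall v (Or.inl rfl)⟩, fun x hx => hall x (Or.inr hx)⟩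

lemma pvBitShift (v : Int) (k : Nat) : PySem.Int.band (v >>> k) 1 = pvBit v k := by
  rw [PySem.Int.band_one]
  have : PySem.Int.mod (v >>> k) 2 = (v >>> k) % 2 := by simp [pysem]
  rw [this, Int.shiftRight_eq_div_pow]
  unfold pvBit
  push_cast
  rfl

lemma pvBit15 (k : Nat) (hk : k < 4) : pvBit 15 k = 1 := by
  interval_cases k <;> decide

lemma pvNonzero (x : Int) (h : 0 ≤ x) (h16 : x < 16) :
    (x ≠ 0) ↔ (pvBit x 0 = 1 ∨ pvBit x 1 = 1 ∨ pvBit x 2 = 1 ∨ pvBit x 3 = 1) := by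
  unfold pvBit; norm_num; omega

lemma pvEq_iff (h0 : Int) (t : List Int) (k : Nat) :
    (∀ v ∈ h0::t, pvBit v k = pvBit h0 k) ↔
    ((∀ v ∈ h0::t, pvBit v k = 1) ∨ (∀ v ∈ h0::t, pvBit v k = 0)) := by
  constructor
  · intro ha
    rcases pvBit01 h0 k with h | h
    · right; intro v hv; rw [ha v hv, h]
    · left; intro v hv; rw [ha v hv, h]
  · rintro (hall | hall) <;>
      (intro v hv; rw [hall v hv, hall h0 (List.mem_cons_self)])


lemma pvShuffle {P0 P1 P2 P3 Q0 Q1 Q2 Q3 : Prop} :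
    ((P0 ∨ Q0) ∨ (P1 ∨ Q1) ∨ (P2 ∨ Q2) ∨ (P3 ∨ Q3)) ↔
    ((P0 ∨ P1 ∨ P2 ∨ P3) ∨ (Q0 ∨ Q1 ∨ Q2 ∨ Q3)) := by tauto

set_option maxHeartbeats 1600000 in
theorem pvMain (vals : List Int) (hpre : vals ≠ []) :
    is_quarto_line vals = is_quarto_line_alt vals := by
  obtain ⟨h0, t, rfl⟩ := List.exists_cons_of_ne_nil hpre
  unfold is_quarto_line is_quarto_line_alt
  by_cases hg : (h0::t).any (fun v => v == -1)
  · simp [hg]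
  · rw [if_neg (by simp_all), if_neg (by simp_all)]
    have hstep : (fun (p : Int × Int) v =>
        let w := PySem.Int.mod v 16
        (PySem.Int.band p.1 w, PySem.Int.band p.2 (PySem.Int.band (Int.not w) 15))) = pvStep := rfl
    rw [hstep]
    have hF := pvFoldB (h0::t) 15 15 (by norm_num) (by norm_num)
    set r := (h0::t).foldl pvStep (15, 15)
    have hrange : PySem.List.pyRange 0 4 1 = [0,1,2,3] := by decide
    rw [hrange]
    have hget : PySem.List.pyGet? (h0::t) 0 = some h0 := by
      simp [PySem.List.pyGet?, PySem.List.pyIdx?]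
    simp only [List.any_cons, List.any_nil, Bool.or_false, hget]
    rw [Bool.eq_iff_iff]
    simp only [Bool.or_eq_true, List.all_eq_true, beq_iff_eq, bne_iff_ne]
    have conv1 : ∀ (kI : Int) (kN : Nat), kI.toNat = kN →
        ((∀ v ∈ h0::t, PySem.Int.band (v >>> kI.toNat) 1 = PySem.Int.band (h0 >>> kI.toNat) 1) ↔
         ((∀ v ∈ h0::t, pvBit v kN = 1) ∨ (∀ v ∈ h0::t, pvBit v kN = 0))) := by
      intro kI kN hk
      rw [hk]
      simp only [pvBitShift]
      exact pvEq_iff h0 t kN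
    have hB : ∀ k : Nat, k < 4 →
        ((pvBit r.1 k = 1 ↔ ∀ v ∈ h0::t, pvBit v k = 1) ∧
         (pvBit r.2 k = 1 ↔ ∀ v ∈ h0::t, pvBit v k = 0)) := by
      intro k hk
      refine ⟨?_, ?_⟩
      · rw [(hF.2.2 k hk).1, pvBit15 k hk]; simp
      · rw [(hF.2.2 k hk).2, pvBit15 k hk]; simp
    have EL := or_congr (conv1 0 0 rfl)
      (or_congr (conv1 1 1 rfl) (or_congr (conv1 2 2 rfl) (conv1 3 3 rfl)))
    have ER1 := (pvNonzero r.1 hF.1.1 hF.1.2).trans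
      (or_congr ((hB 0 (by norm_num)).1) (or_congr ((hB 1 (by norm_num)).1)
        (or_congr ((hB 2 (by norm_num)).1) ((hB 3 (by norm_num)).1))))
    have ER2 := (pvNonzero r.2 hF.2.1.1 hF.2.1.2).trans
      (or_congr ((hB 0 (by norm_num)).2) (or_congr ((hB 1 (by norm_num)).2)
        (or_congr ((hB 2 (by norm_num)).2) ((hB 3 (by norm_num)).2))))
    exact EL.trans (pvShuffle.trans (or_congr ER1 ER2).symm)

-- ===== VERDICT (by name: the statement is the Claim_ definition above) =====
theorem is_quarto_line_spec : Claim_equal_is_quarto_line := by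
  intro vals _ hpre
  show is_quarto_line vals = is_quarto_line_alt vals
  exact pvMain vals hpre
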